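-- pv_equiv track=rewrite | github.com/commandTracker/command-tracker-ai | src/get_commands.py | filter_frame
-- ===== SOURCE A (Python) =====
-- def filter_frame(frames):
--     if not frames:
--         return []
--
--     filtered_frames = []
--     prev = frames[0]
--     group_start = prev
--
--     for i in range(1, len(frames)):
--         if frames[i] - prev > 1:
--             if group_start != prev:
--                 filtered_frames.append(group_start)
--             group_start = frames[i]
--         prev = frames[i]
--
--     if group_start != prev:
--         filtered_frames.append(group_start)
--
--     return filtered_frames
-- ===== SOURCE B (Python) =====
-- def filter_frame(frames):
--     # Split into runs at gaps > 1, then keep the first frame of each run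
--     # whose first value differs from its last value.
--     runs = []
--     cur = []
--     for x in frames:
--         if cur and x - cur[-1] > 1:
--             runs.append(cur)
--             cur = [x]
--         else:
--             cur = cur + [x]
--     if cur:
--         runs.append(cur)
--     return [run[0] for run in runs if run[0] != run[-1]]
-- ===== Notes on version B (the rewrite author's own statement) =====
-- stated objective: alternative
-- what changed: Instead of threading prev/group_start scalars through one loop with flush points, B materialises the gap-separated runs as an explicit list of lists in one pass and then, in a second filter/map pass, emits the first element of each run whose first element differs from its last element.
import Mathlib
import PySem

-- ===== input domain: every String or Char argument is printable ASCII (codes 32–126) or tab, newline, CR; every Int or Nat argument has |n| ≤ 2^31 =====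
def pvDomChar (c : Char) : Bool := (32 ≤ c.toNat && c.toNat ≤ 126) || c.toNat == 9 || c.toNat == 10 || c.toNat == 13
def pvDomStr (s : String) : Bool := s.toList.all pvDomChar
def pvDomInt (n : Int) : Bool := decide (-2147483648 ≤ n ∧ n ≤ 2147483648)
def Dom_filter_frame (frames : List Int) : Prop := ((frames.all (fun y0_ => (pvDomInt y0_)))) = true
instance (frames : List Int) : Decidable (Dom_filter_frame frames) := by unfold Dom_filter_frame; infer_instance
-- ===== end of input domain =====

-- B replaces A's scalar prev/group_start loop with an explicit list of gap-separated runs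
-- built in one pass, then a filter/map pass over the runs (objective: alternative decomposition).

-- ===== PORT A =====
-- loop body of A: state = (filtered_frames, prev, group_start), x = frames[i]
def pvBodyA (st : List Int × Int × Int) (x : Int) : List Int × Int × Int :=
  if x - st.2.1 > 1 then
    ((if st.2.2 ≠ st.2.1 then st.1 ++ [st.2.2] else st.1), x, x)
  else (st.1, x, st.2.2)

def filter_frame (frames : List Int) : List Int :=
  if frames = [] then []
  else
    let f0 := PySem.List.pyGetD frames 0 0
    let s := (PySem.List.pyRange 1 (PySem.List.len frames) 1).foldl
      (fun st i => pvBodyA st (PySem.List.pyGetD frames i 0)) ([], f0, f0)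
    if s.2.2 ≠ s.2.1 then s.1 ++ [s.2.2] else s.1

-- ===== PORT B =====
-- loop body of B: state = (runs, cur)
def pvBodyB (st : List (List Int) × List Int) (x : Int) : List (List Int) × List Int :=
  if st.2 ≠ [] ∧ x - st.2.getLastD 0 > 1 then (st.1 ++ [st.2], [x])
  else (st.1, st.2 ++ [x])

-- [run[0] for run in runs if run[0] != run[-1]]
def pvOutOf (runs : List (List Int)) : List Int :=
  (runs.filter (fun r => r.headD 0 ≠ r.getLastD 0)).map (fun r => r.headD 0)

def filter_frame_alt (frames : List Int) : List Int :=
  let t := frames.foldl pvBodyB ([], [])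
  pvOutOf (if t.2 ≠ [] then t.1 ++ [t.2] else t.1)

-- ===== PRECONDITION & SPEC =====
def Spec_filter_frame (frames : List Int) (out : List Int) : Prop := out = filter_frame_alt frames
instance (frames : List Int) (out : List Int) : Decidable (Spec_filter_frame frames out) := by unfold Spec_filter_frame; infer_instance

-- ===== CLAIM (what is proved, stated in full; the proofs are below) =====
def Claim_equal_filter_frame : Prop := ∀ (frames : List Int), Dom_filter_frame frames → Spec_filter_frame frames (filter_frame frames)

-- ===== LEMMAS AND PROOFS =====

lemma pvOutOf_append_singleton (runs : List (List Int)) (cur : List Int) :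
    pvOutOf (runs ++ [cur]) =
      pvOutOf runs ++ (if cur.headD 0 ≠ cur.getLastD 0 then [cur.headD 0] else []) := by
  unfold pvOutOf
  rw [List.filter_append, List.map_append]
  by_cases h : cur.head?.getD 0 = cur.getLast?.getD 0 <;>
    simp [List.headD_eq_head?_getD, List.getLastD_eq_getLast?, h]

lemma headD_append_singleton (cur : List Int) (x : Int) (h : cur ≠ []) :
    (cur ++ [x]).headD 0 = cur.headD 0 := by
  cases cur with
  | nil => exact absurd rfl h
  | cons a t => simp

-- loop invariant: A's (filtered, prev, gs) corresponds to B's (runs, cur) with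
-- cur nonempty, cur.head = gs, cur.last = prev, filtered = pvOutOf runs.
lemma pv_loop_eq : ∀ (xs filtered : List Int) (prev gs : Int)
    (runs : List (List Int)) (cur : List Int),
    cur ≠ [] → cur.headD 0 = gs → cur.getLastD 0 = prev → filtered = pvOutOf runs →
    (let s := xs.foldl pvBodyA (filtered, prev, gs)
     if s.2.2 ≠ s.2.1 then s.1 ++ [s.2.2] else s.1)
      = (let t := xs.foldl pvBodyB (runs, cur)
         pvOutOf (if t.2 ≠ [] then t.1 ++ [t.2] else t.1)) := by
  intro xs
  induction xs with
  | nil =>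
    intro filtered prev gs runs cur hne hh hl hf
    simp only [List.foldl_nil, ne_eq, hne, not_false_eq_true, if_true]
    rw [pvOutOf_append_singleton, hh, hl, hf]
    split_ifs <;> simp_all
  | cons x rest ih =>
    intro filtered prev gs runs cur hne hh hl hf
    simp only [List.foldl_cons]
    by_cases hgap : x - prev > 1
    · have : pvBodyA (filtered, prev, gs) x =
        ((if gs ≠ prev then filtered ++ [gs] else filtered), x, x) := by
        simp [pvBodyA, hgap]
      rw [this]
      have : pvBodyB (runs, cur) x = (runs ++ [cur], [x]) := by
        simp only [pvBodyB, hl]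
        rw [if_pos ⟨hne, hgap⟩]
      rw [this]
      refine ih _ _ _ _ _ (by simp) (by simp) (by simp) ?_
      rw [pvOutOf_append_singleton, hh, hl, hf]
      split_ifs <;> simp_all
    · have : pvBodyA (filtered, prev, gs) x = (filtered, x, gs) := by
        simp [pvBodyA, hgap]
      rw [this]
      have : pvBodyB (runs, cur) x = (runs, cur ++ [x]) := by
        simp only [pvBodyB, hl]
        rw [if_neg (by exact fun h => hgap h.2)]
      rw [this]
      exact ih _ _ _ _ _ (by simp) (by rw [headD_append_singleton _ _ hne]; exact hh)
        (by simp) hf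

-- ===== VERDICT (by name: the statement is the Claim_ definition above) =====
theorem filter_frame_spec : Claim_equal_filter_frame := by
  intro frames _
  unfold Spec_filter_frame filter_frame filter_frame_alt
  cases frames with
  | nil => simp [pvOutOf]
  | cons f0 rest =>
    simp only [if_false, reduceCtorEq]
    rw [PySem.List.foldl_pyRange_pyGetD (f0 :: rest) 0 pvBodyA _ (by norm_num : (0:Int) ≤ 1)]
    simp only [List.foldl_cons, Int.toNat_one, List.drop_succ_cons, List.drop_zero]
    have hB : pvBodyB ([], []) f0 = ([], [f0]) := by simp [pvBodyB]
    rw [hB]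
    have h0 : PySem.List.pyGetD (f0 :: rest) 0 0 = f0 := by
      simp [PySem.List.pyGetD, PySem.List.pyGet?, PySem.List.pyIdx?]
    rw [h0]
    exact pv_loop_eq rest [] f0 f0 [] [f0] (by simp) (by simp) (by simp) (by simp [pvOutOf])
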